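-- pv_equiv track=rewrite | github.com/jumelet/multiblimp | src/word_order/create_pairs.py | get_subtree_indices
-- ===== SOURCE A (Python) =====
-- def get_subtree_indices(tokens, index):
--     """
--     Return all token indices for which `index` is an ancestor.
--     `index` should be 1-based, like CoNLL-U IDs.
--     """
--     # Build child lists
--     children = {}
--     for tok in tokens:
--         head = tok["head"] - 1
--         tid = tok["id"] - 1
--         if head is not None:
--             children.setdefault(head, []).append(tid)
--
--     # Collect descendants
--     stack = children.get(index, [])[:]  # immediate children
--     subtree = set(stack)
--
--     while stack:
--         node = stack.pop()
--         for child in children.get(node, []):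
--             if child not in subtree:
--                 subtree.add(child)
--                 stack.append(child)
--
--     subtree.add(int(index))
--
--     return sorted(subtree)
-- ===== SOURCE B (Python) =====
-- def get_subtree_indices(tokens, index):
--     """
--     Return all token indices for which `index` is an ancestor.
--     `index` should be 1-based, like CoNLL-U IDs.
--     """
--     # Edge list (head-1 -> id-1), then saturate reachability to a fixpoint:
--     # no child-list dict and no explicit DFS stack.
--     edges = [(tok["head"] - 1, tok["id"] - 1) for tok in tokens]
--     reach = set()
--     changed = True
--     while changed:
--         changed = False
--         for head, tid in edges:
--             if (head == index or head in reach) and tid not in reach: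
--                 reach.add(tid)
--                 changed = True
--     reach.add(int(index))
--     return sorted(reach)
-- ===== Notes on version B (the rewrite author's own statement) =====
-- stated objective: alternative
-- what changed: Replaces A's child-list dict plus explicit-stack DFS with a plain edge list saturated to a reachability fixpoint by repeated passes (no dict, no stack).
import Mathlib
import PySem

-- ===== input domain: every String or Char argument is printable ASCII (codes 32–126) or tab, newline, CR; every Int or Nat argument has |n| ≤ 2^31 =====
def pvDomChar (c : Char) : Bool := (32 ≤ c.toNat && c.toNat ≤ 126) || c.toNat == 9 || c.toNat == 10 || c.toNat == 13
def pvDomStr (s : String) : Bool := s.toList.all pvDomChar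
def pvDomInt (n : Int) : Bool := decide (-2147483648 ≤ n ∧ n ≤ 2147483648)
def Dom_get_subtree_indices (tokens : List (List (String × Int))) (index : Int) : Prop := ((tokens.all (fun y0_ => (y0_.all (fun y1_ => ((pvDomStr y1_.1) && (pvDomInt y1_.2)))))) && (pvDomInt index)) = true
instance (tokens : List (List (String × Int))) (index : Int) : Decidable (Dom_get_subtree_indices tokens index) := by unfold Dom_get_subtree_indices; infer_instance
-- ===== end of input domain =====

-- B replaces A's child-list dict + explicit-stack DFS by an edge list saturated to a
-- reachability fixpoint by repeated passes (objective: alternative, same results).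

-- tok["head"] - 1 / tok["id"] - 1 (shared accessor of both sources; outside Pre_ the
-- missing-key KeyError is modelled by an arbitrary default, nothing is claimed there)
def pvHead (tok : List (String × Int)) : Int := ((PySem.Dict.mk tok).get? "head").getD 0 - 1

def pvTid (tok : List (String × Int)) : Int := ((PySem.Dict.mk tok).get? "id").getD 0 - 1

-- ===== PORT A =====
-- inner 'for child in children.get(node, [])' body (stack top at the list head)
def pvInnerA (cs : List Int) (st : PySem.Set Int × List Int) : PySem.Set Int × List Int :=
  cs.foldl (fun st child =>
    if PySem.Set.contains st.1 child then st
    else (PySem.Set.add st.1 child, child :: st.2)) st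

-- 'while stack:' loop; fuel is an upper bound on the number of iterations
def pvLoopA (children : PySem.Dict Int (List Int)) :
    Nat → List Int → PySem.Set Int → PySem.Set Int
  | 0, _, subtree => subtree
  | _ + 1, [], subtree => subtree
  | fuel + 1, node :: rest, subtree =>
      let st := pvInnerA (children.getD node []) (subtree, rest)
      pvLoopA children fuel st.2 st.1

def get_subtree_indices (tokens : List (List (String × Int))) (index : Int) : List Int :=
  let children := tokens.foldl
    (fun d tok => d.modify (pvHead tok) [] (fun l => l ++ [pvTid tok])) PySem.Dict.empty
  let stack0 := children.getD index []
  let subtree : PySem.Set Int := PySem.Set.ofList stack0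
  -- Python pops from the END of the list; with the stack top at the head the seed is reversed
  let final := pvLoopA children (3 * tokens.length + 1) stack0.reverse subtree
  PySem.List.sorted (PySem.Set.add final index) (fun x => x) false

-- ===== PORT B =====
-- one 'for head, tid in edges:' pass, carrying (reach, changed)
def pvPassB (index : Int) (edges : List (Int × Int)) (st : PySem.Set Int × Bool) :
    PySem.Set Int × Bool :=
  edges.foldl (fun st e =>
    if (e.1 == index || PySem.Set.contains st.1 e.1) && !(PySem.Set.contains st.1 e.2)
    then (PySem.Set.add st.1 e.2, true) else st) st

-- 'while changed:' loop; fuel is an upper bound on the number of passes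
def pvLoopB (index : Int) (edges : List (Int × Int)) : Nat → PySem.Set Int → PySem.Set Int
  | 0, reach => reach
  | fuel + 1, reach =>
      let st := pvPassB index edges (reach, false)
      if st.2 then pvLoopB index edges fuel st.1 else st.1

def get_subtree_indices_alt (tokens : List (List (String × Int))) (index : Int) : List Int :=
  let edges := tokens.map (fun tok => (pvHead tok, pvTid tok))
  let reach := pvLoopB index edges (tokens.length + 1) PySem.Set.empty
  PySem.List.sorted (PySem.Set.add reach index) (fun x => x) false

-- ===== PRECONDITION & SPEC =====
-- Pre_ excludes only the inputs where A raises KeyError: a token without a "head" or "id" key.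
def Pre_get_subtree_indices (tokens : List (List (String × Int))) (index : Int) : Prop :=
  ∀ tok ∈ tokens, (PySem.Dict.mk tok).contains "head" = true ∧ (PySem.Dict.mk tok).contains "id" = true

instance (tokens : List (List (String × Int))) (index : Int) : Decidable (Pre_get_subtree_indices tokens index) := by
  unfold Pre_get_subtree_indices; infer_instance

def pvWitness_get_subtree_indices : (List (List (String × Int))) × Int :=
  ([[("head", 2), ("id", 1)], [("head", 1), ("id", 2)]], 0)

def Spec_get_subtree_indices (tokens : List (List (String × Int))) (index : Int) (out : List Int) : Prop := out = get_subtree_indices_alt tokens index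
instance (tokens : List (List (String × Int))) (index : Int) (out : List Int) : Decidable (Spec_get_subtree_indices tokens index out) := by unfold Spec_get_subtree_indices; infer_instance

-- ===== CLAIM (what is proved, stated in full; the proofs are below) =====
def Claim_equal_get_subtree_indices : Prop := ∀ (tokens : List (List (String × Int))) (index : Int), Dom_get_subtree_indices tokens index → Pre_get_subtree_indices tokens index → Spec_get_subtree_indices tokens index (get_subtree_indices tokens index)

-- ===== LEMMAS AND PROOFS =====

-- the (head-1, id-1) edge list both programs work over
def pvPairs (tokens : List (List (String × Int))) : List (Int × Int) :=
  tokens.map (fun tok => (pvHead tok, pvTid tok))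

-- "n is a proper descendant of index": a nonempty chain of edges from index to n
def pvR (tokens : List (List (String × Int))) (index n : Int) : Prop :=
  Relation.TransGen (fun a b => (a, b) ∈ pvPairs tokens) index n

-- universe of addable values, and the count of those not yet collected (termination measure)
def pvU (tokens : List (List (String × Int))) : List Int := ((pvPairs tokens).map (·.2)).dedup

def pvCnt (tokens : List (List (String × Int))) (sub : List Int) : Nat :=
  ((pvU tokens).filter (fun t => !(PySem.Set.contains sub t))).length

def pvChildren (tokens : List (List (String × Int))) : PySem.Dict Int (List Int) :=
  tokens.foldl (fun d tok => d.modify (pvHead tok) [] (fun l => l ++ [pvTid tok])) PySem.Dict.empty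


-- ---- generic helpers ----
theorem pv_filter_len_succ {l : List Int} (hnd : l.Nodup) {c : Int} (hc : c ∈ l) {p q : Int → Bool}
    (hagree : ∀ x ∈ l, x ≠ c → q x = p x) (hqc : q c = false) (hpc : p c = true) :
    (l.filter q).length + 1 = (l.filter p).length := by
  induction l with
  | nil => cases hc
  | cons a l ih =>
    rcases List.nodup_cons.mp hnd with ⟨hal, hnd'⟩
    rcases List.mem_cons.mp hc with rfl | hc'
    · have hfil : l.filter q = l.filter p :=
        List.filter_congr (fun x hx => hagree x (List.mem_cons_of_mem _ hx)
          (fun hxc => hal (hxc ▸ hx)))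
      simp [hqc, hpc, hfil]
    · have hac : a ≠ c := fun h => hal (h ▸ hc')
      have hqa : q a = p a := hagree a (List.mem_cons_self) hac
      have := ih hnd' hc' (fun x hx hxc => hagree x (List.mem_cons_of_mem _ hx) hxc)
      by_cases hpa : p a = true
      · rw [List.filter_cons_of_pos (hqa ▸ hpa), List.filter_cons_of_pos hpa]
        simpa using this
      · simp only [Bool.not_eq_true] at hpa
        rw [List.filter_cons_of_neg (by simp [hqa, hpa]), List.filter_cons_of_neg (by simp [hpa])]
        exact this

theorem pv_contains_add_eq (s : List Int) (c x : Int) (hxc : x ≠ c) :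
    PySem.Set.contains (PySem.Set.add s c) x = PySem.Set.contains s x := by
  simp only [PySem.Set.add_eq_ite, PySem.Set.contains_eq_listContains, List.contains_eq_mem,
    decide_eq_decide]
  split_ifs with h
  · exact Iff.rfl
  · simp [hxc]

theorem pvChildren_getD (tokens : List (List (String × Int))) (h : Int) :
    (pvChildren tokens).getD h []
      = ((pvPairs tokens).filter (fun p => p.1 == h)).map (·.2) := by
  have e : pvChildren tokens
      = (pvPairs tokens).foldl (fun d p => d.modify p.1 [] (fun l => l ++ [p.2])) PySem.Dict.empty := by
    simp [pvChildren, pvPairs, List.foldl_map]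
  rw [e, PySem.Dict.getD_foldl_modify_append]
  simp

theorem pv_mem_children (tokens : List (List (String × Int))) (h t : Int) :
    t ∈ (pvChildren tokens).getD h [] ↔ (h, t) ∈ pvPairs tokens := by
  rw [pvChildren_getD]
  simp only [List.mem_map, List.mem_filter, beq_iff_eq]
  constructor
  · rintro ⟨⟨a, b⟩, ⟨hp, rfl⟩, rfl⟩; exact hp
  · intro hp; exact ⟨(h, t), ⟨hp, rfl⟩, rfl⟩

-- ---- counting helpers ----
theorem pvCnt_add_le (tokens : List (List (String × Int))) (s : List Int) (c : Int) :
    pvCnt tokens (PySem.Set.add s c) ≤ pvCnt tokens s := by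
  unfold pvCnt
  rw [← List.countP_eq_length_filter, ← List.countP_eq_length_filter]
  apply List.countP_mono_left
  intro x _ hq
  simp only [Bool.not_eq_eq_eq_not, Bool.not_true] at hq ⊢
  by_contra h
  have hxs : x ∈ s := (PySem.Set.contains_iff s x).mp (Bool.of_not_eq_false h)
  have : PySem.Set.contains (PySem.Set.add s c) x = true :=
    (PySem.Set.contains_iff _ x).mpr ((PySem.Set.mem_add s c x).mpr (Or.inl hxs))
  rw [this] at hq; cases hq

theorem pvCnt_add_lt (tokens : List (List (String × Int))) (s : List Int) (c : Int)
    (hcU : c ∈ pvU tokens) (hcs : c ∉ s) :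
    pvCnt tokens (PySem.Set.add s c) + 1 ≤ pvCnt tokens s := by
  unfold pvCnt
  have := pv_filter_len_succ (l := pvU tokens) (List.nodup_dedup _) hcU
    (p := fun t => !(PySem.Set.contains s t)) (q := fun t => !(PySem.Set.contains (PySem.Set.add s c) t))
    (fun x _ hxc => by
      show (!(PySem.Set.contains (PySem.Set.add s c) x)) = (!(PySem.Set.contains s x))
      rw [pv_contains_add_eq s c x hxc])
    (by
      simp [(PySem.Set.mem_add s c c).mpr (Or.inr rfl)])
    (by
      simp
      exact hcs)
  omega

-- ---- inner fold of A ----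
theorem pvInnerA_nil (st : PySem.Set Int × List Int) : pvInnerA [] st = st := rfl
theorem pvInnerA_cons (c : Int) (cs : List Int) (st : PySem.Set Int × List Int) :
    pvInnerA (c :: cs) st
      = pvInnerA cs (if PySem.Set.contains st.1 c then st
                     else (PySem.Set.add st.1 c, c :: st.2)) := rfl

theorem pvInnerA_mono_set (cs : List Int) : ∀ st : PySem.Set Int × List Int,
    ∀ n ∈ st.1, n ∈ (pvInnerA cs st).1 := by
  induction cs with
  | nil => intro st n hn; simpa [pvInnerA_nil] using hn
  | cons c cs ih =>
    intro st n hn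
    rw [pvInnerA_cons]
    split_ifs with h
    · exact ih st n hn
    · exact ih _ n ((PySem.Set.mem_add _ _ _).mpr (Or.inl hn))

theorem pvInnerA_mono_stack (cs : List Int) : ∀ st : PySem.Set Int × List Int,
    ∀ n ∈ st.2, n ∈ (pvInnerA cs st).2 := by
  induction cs with
  | nil => intro st n hn; simpa [pvInnerA_nil] using hn
  | cons c cs ih =>
    intro st n hn
    rw [pvInnerA_cons]
    split_ifs with h
    · exact ih st n hn
    · exact ih _ n (List.mem_cons_of_mem _ hn)

theorem pvInnerA_set_sub (cs : List Int) : ∀ st : PySem.Set Int × List Int,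
    ∀ n ∈ (pvInnerA cs st).1, n ∈ st.1 ∨ n ∈ cs := by
  induction cs with
  | nil => intro st n hn; left; simpa [pvInnerA_nil] using hn
  | cons c cs ih =>
    intro st n hn
    rw [pvInnerA_cons] at hn
    split_ifs at hn with h
    · rcases ih st n hn with h' | h'
      · exact Or.inl h'
      · exact Or.inr (List.mem_cons_of_mem _ h')
    · rcases ih _ n hn with h' | h'
      · rcases (PySem.Set.mem_add _ _ _).mp h' with h'' | h''
        · exact Or.inl h''
        · exact Or.inr (h'' ▸ List.mem_cons_self)
      · exact Or.inr (List.mem_cons_of_mem _ h')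

theorem pvInnerA_cs_sub (cs : List Int) : ∀ st : PySem.Set Int × List Int,
    ∀ c ∈ cs, c ∈ (pvInnerA cs st).1 := by
  induction cs with
  | nil => intro st c hc; cases hc
  | cons c cs ih =>
    intro st d hd
    rw [pvInnerA_cons]
    rcases List.mem_cons.mp hd with rfl | hd'
    · split_ifs with h
      · exact pvInnerA_mono_set cs st d ((PySem.Set.contains_iff _ _).mp h)
      · exact pvInnerA_mono_set cs _ d ((PySem.Set.mem_add _ _ _).mpr (Or.inr rfl))
    · split_ifs with h
      · exact ih st d hd'
      · exact ih _ d hd'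

theorem pvInnerA_new_on_stack (cs : List Int) : ∀ st : PySem.Set Int × List Int,
    ∀ n ∈ (pvInnerA cs st).1, n ∈ st.1 ∨ n ∈ (pvInnerA cs st).2 := by
  induction cs with
  | nil => intro st n hn; left; simpa [pvInnerA_nil] using hn
  | cons c cs ih =>
    intro st n hn
    rw [pvInnerA_cons] at hn ⊢
    split_ifs at hn ⊢ with h
    · exact ih st n hn
    · rcases ih _ n hn with h' | h'
      · rcases (PySem.Set.mem_add _ _ _).mp h' with h'' | h''
        · exact Or.inl h''
        · subst h''
          exact Or.inr (pvInnerA_mono_stack cs _ n List.mem_cons_self)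
      · exact Or.inr h'

theorem pvInnerA_stack_sub (cs : List Int) : ∀ st : PySem.Set Int × List Int,
    ∀ n ∈ (pvInnerA cs st).2, n ∈ st.2 ∨ n ∈ (pvInnerA cs st).1 := by
  induction cs with
  | nil => intro st n hn; left; simpa [pvInnerA_nil] using hn
  | cons c cs ih =>
    intro st n hn
    rw [pvInnerA_cons] at hn ⊢
    split_ifs at hn ⊢ with h
    · exact ih st n hn
    · rcases ih _ n hn with h' | h'
      · rcases List.mem_cons.mp h' with rfl | h''
        · exact Or.inr (pvInnerA_mono_set cs _ n ((PySem.Set.mem_add _ _ _).mpr (Or.inr rfl)))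
        · exact Or.inl h''
      · exact Or.inr h'

theorem pvInnerA_nodup (cs : List Int) : ∀ st : PySem.Set Int × List Int,
    st.1.Nodup → (pvInnerA cs st).1.Nodup := by
  induction cs with
  | nil => intro st h; simpa [pvInnerA_nil] using h
  | cons c cs ih =>
    intro st h
    rw [pvInnerA_cons]
    split_ifs with hc
    · exact ih st h
    · exact ih _ (PySem.Set.nodup_add _ c h)

theorem pvInnerA_measure (tokens : List (List (String × Int))) (cs : List Int)
    (hcs : ∀ c ∈ cs, c ∈ pvU tokens) : ∀ st : PySem.Set Int × List Int,
    (pvInnerA cs st).2.length + 2 * pvCnt tokens (pvInnerA cs st).1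
      ≤ st.2.length + 2 * pvCnt tokens st.1 := by
  induction cs with
  | nil => intro st; simp [pvInnerA_nil]
  | cons c cs ih =>
    intro st
    rw [pvInnerA_cons]
    split_ifs with h
    · exact ih (fun d hd => hcs d (List.mem_cons_of_mem _ hd)) st
    · have hc : c ∉ st.1 := fun hm => by
        rw [(PySem.Set.contains_iff _ _).mpr hm] at h; exact h rfl
      have hlt := pvCnt_add_lt tokens st.1 c (hcs c List.mem_cons_self) hc
      have := ih (fun d hd => hcs d (List.mem_cons_of_mem _ hd)) (PySem.Set.add st.1 c, c :: st.2)
      simp only [List.length_cons] at this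
      omega

-- ---- main loop of A ----
theorem pvLoopA_spec (tokens : List (List (String × Int))) (index : Int) :
    ∀ (fuel : Nat) (stack : List Int) (sub : PySem.Set Int),
    stack.length + 2 * pvCnt tokens sub ≤ fuel →
    sub.Nodup →
    (∀ n ∈ stack, n ∈ sub) →
    (∀ n ∈ sub, pvR tokens index n) →
    (∀ h ∈ sub, h ∉ stack → ∀ t, (h, t) ∈ pvPairs tokens → t ∈ sub) →
    (∀ n ∈ sub, n ∈ pvLoopA (pvChildren tokens) fuel stack sub) ∧
    (pvLoopA (pvChildren tokens) fuel stack sub).Nodup ∧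
    (∀ n ∈ pvLoopA (pvChildren tokens) fuel stack sub, pvR tokens index n) ∧
    (∀ h ∈ pvLoopA (pvChildren tokens) fuel stack sub, ∀ t, (h, t) ∈ pvPairs tokens →
      t ∈ pvLoopA (pvChildren tokens) fuel stack sub) := by
  intro fuel
  induction fuel with
  | zero =>
    intro stack sub hb hnd hss hsound hclosed
    have hstack : stack = [] := by
      cases stack with
      | nil => rfl
      | cons a t => simp at hb
    subst hstack
    exact ⟨fun n hn => hn, hnd, hsound, fun h hh t ht => hclosed h hh (by simp) t ht⟩
  | succ fuel ih =>
    intro stack sub hb hnd hss hsound hclosed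
    cases stack with
    | nil =>
      exact ⟨fun n hn => hn, hnd, hsound, fun h hh t ht => hclosed h hh (by simp) t ht⟩
    | cons node rest =>
      have hstep : pvLoopA (pvChildren tokens) (fuel + 1) (node :: rest) sub
          = pvLoopA (pvChildren tokens) fuel
              (pvInnerA ((pvChildren tokens).getD node []) (sub, rest)).2
              (pvInnerA ((pvChildren tokens).getD node []) (sub, rest)).1 := rfl
      set cs := (pvChildren tokens).getD node [] with hcs_def
      set r := pvInnerA cs (sub, rest) with hr_def
      have hcsU : ∀ c ∈ cs, c ∈ pvU tokens := by
        intro c hc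
        have : (node, c) ∈ pvPairs tokens := (pv_mem_children tokens node c).mp hc
        exact List.mem_dedup.mpr (List.mem_map.mpr ⟨(node, c), this, rfl⟩)
      have hmeas := pvInnerA_measure tokens cs hcsU (sub, rest)
      have hb' : r.2.length + 2 * pvCnt tokens r.1 ≤ fuel := by
        simp only [List.length_cons] at hb
        simp only [← hr_def] at hmeas
        omega
      have hnd' : r.1.Nodup := pvInnerA_nodup cs (sub, rest) hnd
      have hss' : ∀ n ∈ r.2, n ∈ r.1 := by
        intro n hn
        rcases pvInnerA_stack_sub cs (sub, rest) n hn with h' | h'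
        · exact pvInnerA_mono_set cs (sub, rest) n (hss n (List.mem_cons_of_mem _ h'))
        · exact h'
      have hsound' : ∀ n ∈ r.1, pvR tokens index n := by
        intro n hn
        rcases pvInnerA_set_sub cs (sub, rest) n hn with h' | h'
        · exact hsound n h'
        · exact Relation.TransGen.tail (hsound node (hss node List.mem_cons_self))
            ((pv_mem_children tokens node n).mp h')
      have hclosed' : ∀ h ∈ r.1, h ∉ r.2 → ∀ t, (h, t) ∈ pvPairs tokens → t ∈ r.1 := by
        intro h hh hhs t ht
        have hhsub : h ∈ sub := by
          rcases pvInnerA_new_on_stack cs (sub, rest) h hh with h' | h'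
          · exact h'
          · exact absurd h' hhs
        by_cases hnode : h = node
        · subst hnode
          exact pvInnerA_cs_sub cs (sub, rest) t ((pv_mem_children tokens h t).mpr ht)
        · have hrest : h ∉ rest := fun hr =>
            hhs (pvInnerA_mono_stack cs (sub, rest) h hr)
          have : h ∉ node :: rest := by
            intro hm; rcases List.mem_cons.mp hm with h' | h'
            · exact hnode h'
            · exact hrest h'
          exact pvInnerA_mono_set cs (sub, rest) t (hclosed h hhsub this t ht)
      obtain ⟨m, nd, so, cl⟩ := ih r.2 r.1 hb' hnd' hss' hsound' hclosed'
      rw [hstep]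
      exact ⟨fun n hn => m n (pvInnerA_mono_set cs (sub, rest) n hn), nd, so, cl⟩

-- the final set A computes, characterised
def pvFinalA (tokens : List (List (String × Int))) (index : Int) : PySem.Set Int :=
  pvLoopA (pvChildren tokens) (3 * tokens.length + 1)
    ((pvChildren tokens).getD index []).reverse
    (PySem.Set.ofList ((pvChildren tokens).getD index []))

theorem pvFinalA_props (tokens : List (List (String × Int))) (index : Int) :
    (∀ n ∈ PySem.Set.ofList ((pvChildren tokens).getD index []), n ∈ pvFinalA tokens index) ∧
    (pvFinalA tokens index).Nodup ∧
    (∀ n ∈ pvFinalA tokens index, pvR tokens index n) ∧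
    (∀ h ∈ pvFinalA tokens index, ∀ t, (h, t) ∈ pvPairs tokens → t ∈ pvFinalA tokens index) := by
  unfold pvFinalA
  apply pvLoopA_spec
  · -- fuel bound
    have h1 : ((pvChildren tokens).getD index []).length ≤ tokens.length := by
      rw [pvChildren_getD]
      calc (((pvPairs tokens).filter (fun p => p.1 == index)).map (·.2)).length
          = ((pvPairs tokens).filter (fun p => p.1 == index)).length := List.length_map ..
        _ ≤ (pvPairs tokens).length := List.length_filter_le _ _
        _ = tokens.length := List.length_map ..
    have h2 : pvCnt tokens (PySem.Set.ofList ((pvChildren tokens).getD index [])) ≤ tokens.length := by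
      unfold pvCnt
      calc ((pvU tokens).filter _).length
          ≤ (pvU tokens).length := List.length_filter_le _ _
        _ ≤ ((pvPairs tokens).map (·.2)).length := (List.dedup_sublist _).length_le
        _ = (pvPairs tokens).length := List.length_map ..
        _ = tokens.length := List.length_map ..
    rw [List.length_reverse]
    omega
  · exact PySem.Set.nodup_ofList _
  · intro n hn
    exact (PySem.Set.mem_ofList _ _).mpr (List.mem_reverse.mp hn)
  · intro n hn
    exact Relation.TransGen.single
      ((pv_mem_children tokens index n).mp ((PySem.Set.mem_ofList _ _).mp hn))
  · intro h hh hhs t ht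
    exact absurd (List.mem_reverse.mpr ((PySem.Set.mem_ofList _ _).mp hh)) hhs

theorem pvFinalA_nodup (tokens : List (List (String × Int))) (index : Int) :
    (pvFinalA tokens index).Nodup := (pvFinalA_props tokens index).2.1

theorem pvFinalA_mem (tokens : List (List (String × Int))) (index : Int) :
    ∀ n, n ∈ pvFinalA tokens index ↔ pvR tokens index n := by
  intro n
  constructor
  · exact (pvFinalA_props tokens index).2.2.1 n
  · intro hR
    induction hR with
    | single h' =>
      exact (pvFinalA_props tokens index).1 _
        ((PySem.Set.mem_ofList _ _).mpr ((pv_mem_children tokens index _).mpr h'))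
    | tail hm h' ih =>
      exact (pvFinalA_props tokens index).2.2.2 _ ih _ h' 

-- ---- one pass of B ----
theorem pvPassB_nil (index : Int) (st : PySem.Set Int × Bool) : pvPassB index [] st = st := rfl

theorem pvPassB_cons (index : Int) (e : Int × Int) (es : List (Int × Int))
    (st : PySem.Set Int × Bool) :
    pvPassB index (e :: es) st
      = pvPassB index es
          (if (e.1 == index || PySem.Set.contains st.1 e.1) && !(PySem.Set.contains st.1 e.2)
           then (PySem.Set.add st.1 e.2, true) else st) := rfl

theorem pvPassB_flag_mono (index : Int) (es : List (Int × Int)) :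
    ∀ st : PySem.Set Int × Bool, st.2 = true → (pvPassB index es st).2 = true := by
  induction es with
  | nil => intro st h; simpa [pvPassB_nil] using h
  | cons e es ih =>
    intro st h
    rw [pvPassB_cons]
    split_ifs with hc
    · exact ih _ rfl
    · exact ih st h

theorem pvPassB_mono (index : Int) (es : List (Int × Int)) :
    ∀ st : PySem.Set Int × Bool, ∀ n ∈ st.1, n ∈ (pvPassB index es st).1 := by
  induction es with
  | nil => intro st n hn; simpa [pvPassB_nil] using hn
  | cons e es ih =>
    intro st n hn
    rw [pvPassB_cons]
    split_ifs with hc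
    · exact ih _ n ((PySem.Set.mem_add _ _ _).mpr (Or.inl hn))
    · exact ih st n hn

theorem pvPassB_nodup (index : Int) (es : List (Int × Int)) :
    ∀ st : PySem.Set Int × Bool, st.1.Nodup → (pvPassB index es st).1.Nodup := by
  induction es with
  | nil => intro st h; simpa [pvPassB_nil] using h
  | cons e es ih =>
    intro st h
    rw [pvPassB_cons]
    split_ifs with hc
    · exact ih _ (PySem.Set.nodup_add _ e.2 h)
    · exact ih st h

theorem pvPassB_sound (tokens : List (List (String × Int))) (index : Int)
    (es : List (Int × Int)) (hes : ∀ e ∈ es, e ∈ pvPairs tokens) :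
    ∀ st : PySem.Set Int × Bool, (∀ n ∈ st.1, pvR tokens index n) →
    ∀ n ∈ (pvPassB index es st).1, pvR tokens index n := by
  induction es with
  | nil => intro st hs n hn; exact hs n (by simpa [pvPassB_nil] using hn)
  | cons e es ih =>
    intro st hs n hn
    rw [pvPassB_cons] at hn
    split_ifs at hn with hc
    · refine ih (fun f hf => hes f (List.mem_cons_of_mem _ hf)) _ ?_ n hn
      intro m hm
      rcases (PySem.Set.mem_add _ _ _).mp hm with hm' | hm'
      · exact hs m hm'
      · rw [hm']
        rcases Bool.and_eq_true_iff.mp hc with ⟨hc1, _⟩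
        rcases Bool.or_eq_true_iff.mp hc1 with hc' | hc'
        · have he1 : e.1 = index := by simpa using hc'
          exact Relation.TransGen.single
            (show (index, e.2) ∈ pvPairs tokens from by
              rw [← he1]; exact hes e List.mem_cons_self)
        · have he1 : e.1 ∈ st.1 := (PySem.Set.contains_iff _ _).mp hc'
          exact Relation.TransGen.tail (hs e.1 he1)
            (show (e.1, e.2) ∈ pvPairs tokens from hes e List.mem_cons_self)
    · exact ih (fun f hf => hes f (List.mem_cons_of_mem _ hf)) st hs n hn

theorem pvPassB_cnt_le (tokens : List (List (String × Int))) (index : Int)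
    (es : List (Int × Int)) : ∀ st : PySem.Set Int × Bool,
    pvCnt tokens (pvPassB index es st).1 ≤ pvCnt tokens st.1 := by
  induction es with
  | nil => intro st; simp [pvPassB_nil]
  | cons e es ih =>
    intro st
    rw [pvPassB_cons]
    split_ifs with hc
    · exact le_trans (ih _) (pvCnt_add_le tokens st.1 e.2)
    · exact ih st

theorem pvPassB_progress (tokens : List (List (String × Int))) (index : Int)
    (es : List (Int × Int)) (hes : ∀ e ∈ es, e ∈ pvPairs tokens) :
    ∀ st : PySem.Set Int × Bool, (pvPassB index es st).2 = true →
    st.2 = true ∨ pvCnt tokens (pvPassB index es st).1 + 1 ≤ pvCnt tokens st.1 := by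
  induction es with
  | nil => intro st h; left; simpa [pvPassB_nil] using h
  | cons e es ih =>
    intro st hflag
    rw [pvPassB_cons] at hflag ⊢
    split_ifs at hflag ⊢ with hc
    · right
      rcases Bool.and_eq_true_iff.mp hc with ⟨_, hc2⟩
      have hnotin : e.2 ∉ st.1 := by
        intro hm
        rw [(PySem.Set.contains_iff _ _).mpr hm] at hc2
        cases hc2
      have he2U : e.2 ∈ pvU tokens :=
        List.mem_dedup.mpr (List.mem_map.mpr ⟨e, hes e List.mem_cons_self, rfl⟩)
      have hlt := pvCnt_add_lt tokens st.1 e.2 he2U hnotin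
      have hle : pvCnt tokens (pvPassB index es (PySem.Set.add st.1 e.2, true)).1
          ≤ pvCnt tokens (PySem.Set.add st.1 e.2) :=
        pvPassB_cnt_le tokens index es (PySem.Set.add st.1 e.2, true)
      omega
    · rcases ih (fun f hf => hes f (List.mem_cons_of_mem _ hf)) st hflag with h | h
      · exact Or.inl h
      · exact Or.inr h

theorem pvPassB_fixpoint (index : Int) (es : List (Int × Int)) :
    ∀ st : PySem.Set Int × Bool, (pvPassB index es st).2 = false →
    (pvPassB index es st).1 = st.1 ∧
    (∀ e ∈ es, (e.1 = index ∨ e.1 ∈ st.1) → e.2 ∈ st.1) := by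
  induction es with
  | nil => intro st h; exact ⟨by simp [pvPassB_nil], by intro e he; cases he⟩
  | cons e es ih =>
    intro st hflag
    rw [pvPassB_cons] at hflag ⊢
    split_ifs at hflag ⊢ with hc
    · have := pvPassB_flag_mono index es (PySem.Set.add st.1 e.2, true) rfl
      rw [this] at hflag; cases hflag
    · obtain ⟨h1, h2⟩ := ih st hflag
      refine ⟨h1, ?_⟩
      intro f hf hcond
      rcases List.mem_cons.mp hf with rfl | hf'
      · -- the branch was not taken at f, so the closure holds there
        by_contra hnot
        apply hc
        have hc2 : PySem.Set.contains st.1 f.2 = false := by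
          by_contra hx
          exact hnot ((PySem.Set.contains_iff _ _).mp (Bool.of_not_eq_false hx))
        have hc1 : (f.1 == index || PySem.Set.contains st.1 f.1) = true := by
          rcases hcond with h' | h'
          · rw [h']; simp
          · rw [show PySem.Set.contains st.1 f.1 = true from (PySem.Set.contains_iff _ _).mpr h']
            simp
        rw [hc1, hc2]
        rfl
      · exact h2 f hf' hcond

-- ---- main loop of B ----
theorem pvLoopB_succ_true (index : Int) (es : List (Int × Int)) (fuel : Nat)
    (reach : PySem.Set Int) (h : (pvPassB index es (reach, false)).2 = true) :
    pvLoopB index es (fuel + 1) reach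
      = pvLoopB index es fuel (pvPassB index es (reach, false)).1 := by
  simp [pvLoopB, h]

theorem pvLoopB_succ_false (index : Int) (es : List (Int × Int)) (fuel : Nat)
    (reach : PySem.Set Int) (h : (pvPassB index es (reach, false)).2 = false) :
    pvLoopB index es (fuel + 1) reach = (pvPassB index es (reach, false)).1 := by
  simp [pvLoopB, h]

theorem pvLoopB_spec (tokens : List (List (String × Int))) (index : Int) :
    ∀ (fuel : Nat) (reach : PySem.Set Int),
    pvCnt tokens reach + 1 ≤ fuel →
    reach.Nodup →
    (∀ n ∈ reach, pvR tokens index n) →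
    (∀ n ∈ reach, n ∈ pvLoopB index (pvPairs tokens) fuel reach) ∧
    (pvLoopB index (pvPairs tokens) fuel reach).Nodup ∧
    (∀ n ∈ pvLoopB index (pvPairs tokens) fuel reach, pvR tokens index n) ∧
    (∀ e ∈ pvPairs tokens, (e.1 = index ∨ e.1 ∈ pvLoopB index (pvPairs tokens) fuel reach) →
      e.2 ∈ pvLoopB index (pvPairs tokens) fuel reach) := by
  intro fuel
  induction fuel with
  | zero => intro reach hb; omega
  | succ fuel ih =>
    intro reach hb hnd hsound
    have hes : ∀ e ∈ pvPairs tokens, e ∈ pvPairs tokens := fun e he => he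
    cases hflag : (pvPassB index (pvPairs tokens) (reach, false)).2 with
    | false =>
      obtain ⟨h1, h2⟩ := pvPassB_fixpoint index (pvPairs tokens) (reach, false) hflag
      rw [pvLoopB_succ_false index (pvPairs tokens) fuel reach hflag, h1]
      exact ⟨fun n hn => hn, hnd, hsound, h2⟩
    | true =>
      have hprog := pvPassB_progress tokens index (pvPairs tokens) hes (reach, false) hflag
      rcases hprog with h | hlt
      · cases h
      · have hlt' : pvCnt tokens (pvPassB index (pvPairs tokens) (reach, false)).1 + 1
            ≤ pvCnt tokens reach := hlt
        have hb' : pvCnt tokens (pvPassB index (pvPairs tokens) (reach, false)).1 + 1 ≤ fuel := by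
          omega
        have hnd' : (pvPassB index (pvPairs tokens) (reach, false)).1.Nodup :=
          pvPassB_nodup index (pvPairs tokens) (reach, false) hnd
        have hsound' : ∀ n ∈ (pvPassB index (pvPairs tokens) (reach, false)).1, pvR tokens index n :=
          pvPassB_sound tokens index (pvPairs tokens) hes (reach, false) hsound
        obtain ⟨m, nd, so, cl⟩ := ih (pvPassB index (pvPairs tokens) (reach, false)).1 hb' hnd' hsound'
        rw [pvLoopB_succ_true index (pvPairs tokens) fuel reach hflag]
        exact ⟨fun n hn => m n (pvPassB_mono index (pvPairs tokens) (reach, false) n hn),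
          nd, so, cl⟩

def pvFinalB (tokens : List (List (String × Int))) (index : Int) : PySem.Set Int :=
  pvLoopB index (pvPairs tokens) (tokens.length + 1) PySem.Set.empty

theorem pvFinalB_props (tokens : List (List (String × Int))) (index : Int) :
    (∀ n ∈ (PySem.Set.empty : PySem.Set Int), n ∈ pvFinalB tokens index) ∧
    (pvFinalB tokens index).Nodup ∧
    (∀ n ∈ pvFinalB tokens index, pvR tokens index n) ∧
    (∀ e ∈ pvPairs tokens, (e.1 = index ∨ e.1 ∈ pvFinalB tokens index) →
      e.2 ∈ pvFinalB tokens index) := by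
  unfold pvFinalB
  apply pvLoopB_spec
  · have h1 : pvCnt tokens PySem.Set.empty ≤ tokens.length := by
      unfold pvCnt
      calc ((pvU tokens).filter _).length
          ≤ (pvU tokens).length := List.length_filter_le _ _
        _ ≤ ((pvPairs tokens).map (·.2)).length := (List.dedup_sublist _).length_le
        _ = (pvPairs tokens).length := List.length_map ..
        _ = tokens.length := List.length_map ..
    omega
  · exact List.nodup_nil
  · intro n hn; cases hn

theorem pvFinalB_nodup (tokens : List (List (String × Int))) (index : Int) :
    (pvFinalB tokens index).Nodup := (pvFinalB_props tokens index).2.1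

theorem pvFinalB_mem (tokens : List (List (String × Int))) (index : Int) :
    ∀ n, n ∈ pvFinalB tokens index ↔ pvR tokens index n := by
  intro n
  constructor
  · exact (pvFinalB_props tokens index).2.2.1 n
  · intro hR
    induction hR with
    | single h' =>
      exact (pvFinalB_props tokens index).2.2.2 _ h' (Or.inl rfl)
    | tail hm h' ih =>
      exact (pvFinalB_props tokens index).2.2.2 _ h' (Or.inr ih)

-- ===== VERDICT (by name: the statement is the Claim_ definition above) =====
theorem get_subtree_indices_spec : Claim_equal_get_subtree_indices := by
  intro tokens index _hdom _hpre
  unfold Spec_get_subtree_indices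
  have hA : get_subtree_indices tokens index
      = PySem.List.sorted (PySem.Set.add (pvFinalA tokens index) index) (fun x => x) false := rfl
  have hB : get_subtree_indices_alt tokens index
      = PySem.List.sorted (PySem.Set.add (pvFinalB tokens index) index) (fun x => x) false := rfl
  rw [hA, hB]
  apply PySem.List.sorted_eq_sorted_of_perm _ _ _ (fun a b h => h)
  rw [List.perm_ext_iff_of_nodup
    (PySem.Set.nodup_add _ index (pvFinalA_nodup tokens index))
    (PySem.Set.nodup_add _ index (pvFinalB_nodup tokens index))]
  intro n
  rw [PySem.Set.mem_add, PySem.Set.mem_add, pvFinalA_mem, pvFinalB_mem]
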